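-- pv_equiv track=rewrite | github.com/paolocaviedes/CCAF | Main con prediccion.py | contarZerosReverse
-- ===== SOURCE A (Python) =====
-- def contarZerosReverse(cadena):
-- 	cadena=cadena[::-1]
-- 	countZero=0
-- 	flag=True
-- 	for elemento in cadena:
-- 		if flag:
-- 			if elemento=='0':
-- 				countZero+=1
-- 			else:
-- 				flag=False
-- 	return countZero
-- ===== SOURCE B (Python) =====
-- def contarZerosReverse(cadena):
--     return len(cadena) - len(cadena.rstrip('0'))
-- ===== Notes on version B (the rewrite author's own statement) =====
-- stated objective: simpler
-- what changed: Replaces the reversed-scan loop with a stateful flag by a single closed-form expression: the string's length minus the length of the string with its trailing run of zero characters stripped.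
import Mathlib
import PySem

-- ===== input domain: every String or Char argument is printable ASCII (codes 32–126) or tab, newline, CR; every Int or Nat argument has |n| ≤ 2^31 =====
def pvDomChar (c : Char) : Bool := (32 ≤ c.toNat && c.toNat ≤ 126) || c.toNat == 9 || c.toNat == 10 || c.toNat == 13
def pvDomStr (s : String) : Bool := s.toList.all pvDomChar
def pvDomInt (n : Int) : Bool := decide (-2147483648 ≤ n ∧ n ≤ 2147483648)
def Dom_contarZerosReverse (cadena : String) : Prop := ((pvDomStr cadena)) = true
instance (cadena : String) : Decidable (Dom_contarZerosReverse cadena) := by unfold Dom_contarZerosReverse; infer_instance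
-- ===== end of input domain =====

-- B replaces A's reversed scan with a flag by the closed form len(s) - len(s.rstrip('0')); objective: simpler.

-- ===== PORT A =====
-- A: reverse the string, then scan with a flag counting leading '0's of the reversed string.
def stepA (s : Int × Bool) (elemento : Char) : Int × Bool :=
  if s.2 then
    if elemento == '0' then (s.1 + 1, s.2) else (s.1, false)
  else s

def contarZerosReverse (cadena : String) : Int :=
  -- cadena[::-1]: step -1 ≠ 0, so slice? is always some (slice?_none_none_neg_one)
  (((PySem.List.slice? cadena.toList none none (-1)).getD []).foldl stepA (0, true)).1

-- ===== PORT B =====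
-- B: len(cadena) - len(cadena.rstrip('0')); rstrip('0') ported by hand (exact: drop the
-- trailing run of '0' characters), since PySem has no rstrip-with-chars primitive.
def altRstrip0 (cs : List Char) : List Char :=
  (cs.reverse.dropWhile (· == '0')).reverse

def contarZerosReverse_alt (cadena : String) : Int :=
  (cadena.toList.length : Int) - (altRstrip0 cadena.toList).length

-- ===== PRECONDITION & SPEC =====
def Spec_contarZerosReverse (cadena : String) (out : Int) : Prop := out = contarZerosReverse_alt cadena
instance (cadena : String) (out : Int) : Decidable (Spec_contarZerosReverse cadena out) := by unfold Spec_contarZerosReverse; infer_instance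

-- ===== CLAIM (what is proved, stated in full; the proofs are below) =====
def Claim_equal_contarZerosReverse : Prop := ∀ (cadena : String), Dom_contarZerosReverse cadena → Spec_contarZerosReverse cadena (contarZerosReverse cadena)

-- ===== LEMMAS AND PROOFS =====

-- Once the flag is false, the fold keeps the count unchanged.
theorem stepA_false (k : Int) (c : Char) : stepA (k, false) c = (k, false) := rfl

theorem stepA_true_ne (k : Int) (c : Char) (h : ¬ c = '0') : stepA (k, true) c = (k, false) := by
  simp [stepA, h]

theorem foldA_false (l : List Char) (k : Int) :
    l.foldl stepA (k, false) = (k, false) := by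
  induction l with
  | nil => rfl
  | cons c t ih => rw [List.foldl_cons, stepA_false, ih]

-- With the flag true, the fold counts the leading '0'-run of the list.
theorem foldA_true (l : List Char) (k : Int) :
    (l.foldl stepA (k, true)).1 = k + (l.takeWhile (· == '0')).length := by
  induction l generalizing k with
  | nil => simp
  | cons c t ih =>
    by_cases h : c = '0'
    · subst h
      have hs : stepA (k, true) '0' = (k + 1, true) := rfl
      rw [List.foldl_cons, hs, ih]
      simp
      ring
    · rw [List.foldl_cons, stepA_true_ne k c h, foldA_false]
      simp [h]

theorem length_dropWhile_add (l : List Char) :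
    (l.dropWhile (· == '0')).length + (l.takeWhile (· == '0')).length = l.length := by
  rw [Nat.add_comm, ← List.length_append, List.takeWhile_append_dropWhile]

-- ===== VERDICT (by name: the statement is the Claim_ definition above) =====
theorem contarZerosReverse_spec : Claim_equal_contarZerosReverse := by
  intro cadena _
  show contarZerosReverse cadena = contarZerosReverse_alt cadena
  unfold contarZerosReverse contarZerosReverse_alt altRstrip0
  rw [PySem.List.slice?_none_none_neg_one, Option.getD_some, foldA_true]
  have h := length_dropWhile_add cadena.toList.reverse
  simp only [List.length_reverse] at h ⊢
  omega
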